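-- pv_equiv track=rewrite | github.com/DaniFdezAlvarez/wMERA | wmera/mera_core/str_ops/str_impl/needleman_wunsch.py | _interpret_alignment
-- ===== SOURCE A (Python) =====
-- _GAP = '-'
--
-- def _interpret_alignment(alignment_original_short, alignment_original_long):
--     """
--
--     It returns the number of aligned chars and the number of parts in which the short string
--     has been splitted in order to reach the best alignement.
--
--     The string params are expected to have the same length.
--     Short_str could contain _GAP characters or not. long should not contain it.
--
--     """
--     # print alignment_original_short, alignment_original_long
--     parts = 1
--     coincidences = 0
--     last_char_was_a_gap = True
--     i = 0
--     ### looking for firts non-gap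
--     while i < len(alignment_original_short):
--         if alignment_original_short[i] != _GAP:
--             break
--         i += 1
--     ### calculating parts and coincidences
--     while i < len(alignment_original_short):  # One of the chains. not mattering which one.They have the same length
--         if alignment_original_short[i] == _GAP:
--             if not last_char_was_a_gap:
--                 last_char_was_a_gap = True
--                 parts += 1
--         else:
--             if alignment_original_short[i] == alignment_original_long[i]:
--                 coincidences += 1
--             if last_char_was_a_gap:
--                 last_char_was_a_gap = False
--         i += 1
--     if alignment_original_short[-1] == _GAP:
--         parts -= 1
--     return parts, coincidences
-- ===== SOURCE B (Python) =====
-- _GAP = '-'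
--
--
-- def _interpret_alignment(alignment_original_short, alignment_original_long):
--     s = alignment_original_short
--     l = alignment_original_long
--     coincidences = sum(1 for i, c in enumerate(s)
--                        if c != _GAP and c == l[i])
--     parts = sum(1 for i, c in enumerate(s)
--                 if c != _GAP and (i == 0 or s[i - 1] == _GAP))
--     return parts, coincidences
-- ===== Notes on version B (the rewrite author's own statement) =====
-- stated objective: simpler
-- what changed: Replaces A's single stateful scan (skip loop + last_char_was_a_gap flag + end-of-string correction) by two independent stateless counts: coincidences as a comprehension over matching non-gap positions, and parts as the number of segment starts (non-gap char at position 0 or preceded by a gap).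
import Mathlib
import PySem

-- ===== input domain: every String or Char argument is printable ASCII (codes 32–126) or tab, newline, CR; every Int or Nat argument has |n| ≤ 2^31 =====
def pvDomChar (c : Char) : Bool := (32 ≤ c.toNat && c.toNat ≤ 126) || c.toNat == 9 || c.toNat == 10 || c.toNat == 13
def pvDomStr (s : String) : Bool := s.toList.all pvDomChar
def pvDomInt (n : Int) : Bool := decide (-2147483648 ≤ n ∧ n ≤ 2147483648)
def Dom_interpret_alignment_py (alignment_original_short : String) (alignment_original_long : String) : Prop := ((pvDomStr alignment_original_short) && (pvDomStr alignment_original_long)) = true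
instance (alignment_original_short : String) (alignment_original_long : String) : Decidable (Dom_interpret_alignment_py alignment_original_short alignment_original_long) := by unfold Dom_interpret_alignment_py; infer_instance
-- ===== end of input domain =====

-- B replaces A's single stateful scan (skip loop + last_char_was_a_gap flag + final correction)
-- by two independent stateless counts (matching positions; segment starts); same O(n) cost.
-- ===== PORT A =====
-- first while loop: advance i past leading gap characters
def pvASkip (cs : List Char) (i : Nat) : Nat :=
  if h : i < cs.length then
    if cs[i] ≠ '-' then i else pvASkip cs (i + 1)
  else i
termination_by cs.length - i

-- second while loop, state (i, parts, coincidences, last_char_was_a_gap)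
def pvALoop (cs ls : List Char) (i : Nat) (parts coinc : Int) (lastGap : Bool) : Int × Int :=
  if h : i < cs.length then
    if cs[i] = '-' then
      if !lastGap then pvALoop cs ls (i + 1) (parts + 1) coinc true
      else pvALoop cs ls (i + 1) parts coinc true
    else
      match PySem.List.pyGet? ls (i : Int) with
      | none => (parts, coinc)  -- long[i] raises IndexError in Python; excluded by Pre_
      | some c =>
        if cs[i] = c then pvALoop cs ls (i + 1) parts (coinc + 1) false
        else pvALoop cs ls (i + 1) parts coinc false
  else (parts, coinc)
termination_by cs.length - i

def interpret_alignment_py (alignment_original_short : String) (alignment_original_long : String) : Int × Int :=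
  let cs := alignment_original_short.toList
  let ls := alignment_original_long.toList
  let i := pvASkip cs 0
  let r := pvALoop cs ls i 1 0 true
  match PySem.List.pyGet? cs (-1) with
  | none => r  -- short[-1] raises IndexError on empty short; excluded by Pre_
  | some c => if c = '-' then (r.1 - 1, r.2) else r

-- ===== PORT B =====
def interpret_alignment_py_alt (alignment_original_short : String) (alignment_original_long : String) : Int × Int :=
  let cs := alignment_original_short.toList
  let ls := alignment_original_long.toList
  let coincidences : Int :=
    ((PySem.List.enumerate cs).countP
      (fun p => p.2 != '-' && (PySem.List.pyGet? ls p.1 == some p.2)) : Nat)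
  let parts : Int :=
    ((PySem.List.enumerate cs).countP
      (fun p => p.2 != '-' && (p.1 == 0 || PySem.List.pyGet? cs (p.1 - 1) == some '-')) : Nat)
  (parts, coincidences)

-- ===== PRECONDITION & SPEC =====
-- Pre_ excludes exactly the inputs on which Python A raises IndexError: empty short
-- (short[-1]), and a long string too short at some non-gap position of short (long[i]).
def Pre_interpret_alignment_py (alignment_original_short : String) (alignment_original_long : String) : Prop :=
  alignment_original_short.toList ≠ [] ∧
  ∀ j, j < alignment_original_short.toList.length →
    alignment_original_short.toList.getD j ' ' ≠ '-' →
    j < alignment_original_long.toList.length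
instance (alignment_original_short : String) (alignment_original_long : String) : Decidable (Pre_interpret_alignment_py alignment_original_short alignment_original_long) := by unfold Pre_interpret_alignment_py; infer_instance

def pvWitness_interpret_alignment_py : String × String := ("ab-a", "abca")

def Spec_interpret_alignment_py (alignment_original_short : String) (alignment_original_long : String) (out : Int × Int) : Prop := out = interpret_alignment_py_alt alignment_original_short alignment_original_long
instance (alignment_original_short : String) (alignment_original_long : String) (out : Int × Int) : Decidable (Spec_interpret_alignment_py alignment_original_short alignment_original_long out) := by unfold Spec_interpret_alignment_py; infer_instance

-- ===== CLAIM (what is proved, stated in full; the proofs are below) =====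
def Claim_equal_interpret_alignment_py : Prop := ∀ (alignment_original_short : String) (alignment_original_long : String), Dom_interpret_alignment_py alignment_original_short alignment_original_long → Pre_interpret_alignment_py alignment_original_short alignment_original_long → Spec_interpret_alignment_py alignment_original_short alignment_original_long (interpret_alignment_py alignment_original_short alignment_original_long)
-- ===== LEMMAS AND PROOFS =====

-- last_char_was_a_gap, as a function of the position
def pvGapB (cs : List Char) (i : Nat) : Bool := i == 0 || cs.getD (i - 1) ' ' == '-'
-- positions where A's loop increments parts
def pvInc (cs : List Char) (j : Nat) : Bool := cs.getD j ' ' == '-' && !(pvGapB cs j)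
-- segment starts (B's parts predicate)
def pvStart (cs : List Char) (j : Nat) : Bool := cs.getD j ' ' != '-' && pvGapB cs j
-- coincidence positions
def pvMatch (cs ls : List Char) (j : Nat) : Bool :=
  cs.getD j ' ' != '-' && (PySem.List.pyGet? ls (j : Int) == some (cs.getD j ' '))

-- number of j in [i, i+m) with p j
def pvCnt (p : Nat → Bool) (i m : Nat) : Int :=
  match m with
  | 0 => 0
  | m + 1 => (if p i then 1 else 0) + pvCnt p (i + 1) m

lemma pvCnt_congr (p q : Nat → Bool) (i m : Nat)
    (h : ∀ j, i ≤ j → j < i + m → p j = q j) : pvCnt p i m = pvCnt q i m := by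
  induction m generalizing i with
  | zero => rfl
  | succ m ih =>
    simp only [pvCnt, h i (le_refl i) (by omega)]
    rw [ih (i + 1) (fun j h1 h2 => h j (by omega) (by omega))]

lemma pvCnt_add (p : Nat → Bool) (i a b : Nat) :
    pvCnt p i (a + b) = pvCnt p i a + pvCnt p (i + a) b := by
  induction a generalizing i with
  | zero => simp [pvCnt]
  | succ a ih =>
    rw [show a + 1 + b = (a + b) + 1 from by omega]
    simp only [pvCnt]
    rw [ih (i + 1), show i + (a + 1) = (i + 1) + a from by omega]
    ring

lemma pvCnt_zero (p : Nat → Bool) (i m : Nat)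
    (h : ∀ j, i ≤ j → j < i + m → p j = false) : pvCnt p i m = 0 := by
  induction m generalizing i with
  | zero => rfl
  | succ m ih =>
    simp only [pvCnt, h i (le_refl i) (by omega),
      ih (i + 1) (fun j h1 h2 => h j (by omega) (by omega))]
    simp

lemma pvCnt_snoc (p : Nat → Bool) (i m : Nat) :
    pvCnt p i (m + 1) = pvCnt p i m + (if p (i + m) then 1 else 0) := by
  have h := pvCnt_add p i m 1
  simp only [pvCnt, add_zero] at h
  exact h

-- the skip loop: stays in range and only passes gaps
lemma pvASkip_spec (cs : List Char) (i : Nat) (hi : i ≤ cs.length) :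
    i ≤ pvASkip cs i ∧ pvASkip cs i ≤ cs.length ∧
    ∀ j, i ≤ j → j < pvASkip cs i → cs.getD j ' ' = '-' := by
  induction i using pvASkip.induct cs with
  | case1 i h hne =>
    rw [pvASkip]
    simp only [dif_pos h, if_pos hne]
    exact ⟨le_refl _, by omega, fun j h1 h2 => absurd h2 (by omega)⟩
  | case2 i h hne ih =>
    rw [pvASkip]
    simp only [dif_pos h, if_neg hne]
    have hc : cs[i] = '-' := by simpa using hne
    obtain ⟨h1, h2, h3⟩ := ih (by omega)
    refine ⟨by omega, h2, fun j hj1 hj2 => ?_⟩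
    rcases Nat.eq_or_lt_of_le hj1 with rfl | hlt
    · simp [List.getD_eq_getElem?_getD, h, hc]
    · exact h3 j (by omega) hj2
  | case3 i h =>
    rw [pvASkip]
    simp only [dif_neg h]
    exact ⟨le_refl _, hi, fun j h1 h2 => absurd h2 (by omega)⟩

-- the main loop computes the counts of pvInc and pvMatch over the remaining positions
lemma pvALoop_eq (cs ls : List Char)
    (H : ∀ j, j < cs.length → cs.getD j ' ' ≠ '-' → j < ls.length) :
    ∀ (m i : Nat), i + m = cs.length → ∀ parts coinc,
      pvALoop cs ls i parts coinc (pvGapB cs i) =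
        (parts + pvCnt (pvInc cs) i m, coinc + pvCnt (pvMatch cs ls) i m) := by
  intro m
  induction m with
  | zero =>
    intro i hi parts coinc
    rw [pvALoop]
    simp [show ¬ i < cs.length by omega, pvCnt]
  | succ m ih =>
    intro i hi parts coinc
    have h : i < cs.length := by omega
    have hgd : cs.getD i ' ' = cs[i] := by simp [List.getD_eq_getElem?_getD, h]
    rw [pvALoop]
    simp only [dif_pos h]
    by_cases hc : cs[i] = '-'
    · -- gap position
      have hgd' : cs.getD i ' ' = '-' := hgd.trans hc
      have hg1 : pvGapB cs (i + 1) = true := by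
        simp only [pvGapB, show i + 1 - 1 = i from rfl, hgd']; simp
      have hinc : pvInc cs i = !(pvGapB cs i) := by
        simp only [pvInc, hgd']; simp
      have hm : pvMatch cs ls i = false := by
        simp only [pvMatch, hgd']; simp
      rw [if_pos hc]
      cases hg : pvGapB cs i with
      | true =>
        simp only [Bool.not_true, Bool.false_eq_true, ite_false]
        rw [← hg1, ih (i + 1) (by omega) parts coinc]
        simp only [pvCnt, hinc, hg, hm, Bool.not_true, ite_false, Bool.false_eq_true]
        rw [Prod.mk.injEq]
        exact ⟨by ring, by ring⟩
      | false =>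
        simp only [Bool.not_false, if_true]
        rw [← hg1, ih (i + 1) (by omega) (parts + 1) coinc]
        simp only [pvCnt, hinc, hg, hm, Bool.not_false, if_true, ite_false, Bool.false_eq_true]
        rw [Prod.mk.injEq]
        exact ⟨by ring, by ring⟩
    · -- non-gap position: long[i] is in range
      have hl : i < ls.length := H i h (by rw [hgd]; exact hc)
      have hget : PySem.List.pyGet? ls (i : Int) = some ls[i] := by
        simp [hl]
      have hg0 : pvGapB cs (i + 1) = false := by
        simp only [pvGapB, show i + 1 - 1 = i from rfl, hgd]; simp [hc]
      have hinc : pvInc cs i = false := by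
        simp only [pvInc, hgd]; simp [hc]
      have hm : pvMatch cs ls i = (ls[i] == cs[i]) := by
        simp only [pvMatch, hgd, hget]; simp [hc]
      rw [if_neg hc]
      simp only [hget]
      by_cases he : cs[i] = ls[i]
      · rw [if_pos he, ← hg0, ih (i + 1) (by omega) parts (coinc + 1)]
        simp only [pvCnt, hinc, hm, ← he, beq_self_eq_true, if_true, ite_false,
          Bool.false_eq_true]
        rw [Prod.mk.injEq]
        exact ⟨by ring, by ring⟩
      · rw [if_neg he, ← hg0, ih (i + 1) (by omega) parts coinc]
        have hne : (ls[i] == cs[i]) = false := by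
          simp; exact fun hx => he hx.symm
        simp only [pvCnt, hinc, hm, hne, ite_false, Bool.false_eq_true]
        rw [Prod.mk.injEq]
        exact ⟨by ring, by ring⟩

-- below the first non-gap index all three predicates are false
lemma pv_below_skip (cs ls : List Char) (i0 : Nat)
    (hall : ∀ j, j < i0 → cs.getD j ' ' = '-') :
    (∀ j, j < i0 → pvInc cs j = false) ∧ (∀ j, j < i0 → pvStart cs j = false) ∧
    (∀ j, j < i0 → pvMatch cs ls j = false) := by
  refine ⟨fun j hj => ?_, fun j hj => ?_, fun j hj => ?_⟩
  · have hg : pvGapB cs j = true := by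
      rcases Nat.eq_zero_or_pos j with rfl | hp
      · simp [pvGapB]
      · simp only [pvGapB, hall (j - 1) (by omega)]; simp
    simp [pvInc, hg]
  · simp only [pvStart, hall j hj]; simp
  · simp only [pvMatch, hall j hj]; simp

-- the combinatorial heart: 1 + #increments − (1 if the last char is a gap) = #segment starts
lemma pv_parts_count (cs : List Char) (h : cs ≠ []) :
    1 + pvCnt (pvInc cs) 0 cs.length =
      pvCnt (pvStart cs) 0 cs.length +
        (if cs.getD (cs.length - 1) ' ' = '-' then 1 else 0) := by
  induction cs using List.reverseRecOn with
  | nil => simp at h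
  | append_singleton ds c ih =>
    have hgd_last : (ds ++ [c]).getD ds.length ' ' = c := by
      simp [List.getD_eq_getElem?_getD]
    have hagree : ∀ j, j < ds.length → (ds ++ [c]).getD j ' ' = ds.getD j ' ' := by
      intro j hj
      simp [List.getD_eq_getElem?_getD, List.getElem?_append_left hj]
    rcases List.eq_nil_or_concat ds with rfl | hne
    · -- single character
      simp only [List.nil_append, List.length_cons, List.length_nil, pvCnt, pvInc, pvStart,
        pvGapB]
      by_cases hc : c = '-' <;> simp [hc, List.getD]
    · have hds : ds ≠ [] := by rcases hne with ⟨a, b, rfl⟩; simp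
      have h0 : 0 < ds.length := List.length_pos_iff.mpr hds
      have hsame : ∀ j, j < ds.length → pvGapB (ds ++ [c]) j = pvGapB ds j := by
        intro j hj
        rcases Nat.eq_zero_or_pos j with rfl | hp
        · simp [pvGapB]
        · simp only [pvGapB, hagree (j - 1) (by omega)]
      have hcongr : ∀ p q : Nat → Bool, (∀ j, j < ds.length → p j = q j) →
          pvCnt p 0 ds.length = pvCnt q 0 ds.length := fun p q hpq =>
        pvCnt_congr p q 0 ds.length (fun j _ hj => hpq j (by omega))
      have hIncEq : pvCnt (pvInc (ds ++ [c])) 0 ds.length = pvCnt (pvInc ds) 0 ds.length :=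
        hcongr _ _ (fun j hj => by simp only [pvInc, hagree j hj, hsame j hj])
      have hStartEq : pvCnt (pvStart (ds ++ [c])) 0 ds.length = pvCnt (pvStart ds) 0 ds.length :=
        hcongr _ _ (fun j hj => by simp only [pvStart, hagree j hj, hsame j hj])
      have hgb : pvGapB (ds ++ [c]) ds.length = (ds.getD (ds.length - 1) ' ' == '-') := by
        simp only [pvGapB, hagree (ds.length - 1) (by omega)]
        simp [Nat.pos_iff_ne_zero.mp h0]
      have ihv := ih hds
      rw [show (ds ++ [c]).length = ds.length + 1 from by simp, pvCnt_snoc, pvCnt_snoc,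
        hIncEq, hStartEq]
      simp only [Nat.zero_add, show ds.length + 1 - 1 = ds.length from rfl, hgd_last,
        pvInc, pvStart, hgb]
      by_cases hc : c = '-' <;> by_cases hL : ds.getD (ds.length - 1) ' ' = '-' <;>
        rw [List.getD_eq_getElem?_getD] at hL <;>
        simp [hc, hL, List.getD_eq_getElem?_getD] at ihv ⊢ <;> omega

-- B's enumerate-countP equals pvCnt of the corresponding index predicate
lemma pv_countP_enum (cs : List Char) :
    ∀ (i : Nat) (p : Nat → Bool) (q : Int × Char → Bool),
      (∀ k, (hk : k < cs.length) → q (((i + k : Nat) : Int), cs[k]) = p (i + k)) →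
      ((PySem.List.enumerate cs (i : Int)).countP q : Int) = pvCnt p i cs.length := by
  induction cs with
  | nil => intro i p q h; simp [PySem.List.enumerate_nil, pvCnt]
  | cons c cs ih =>
    intro i p q h
    have h0 : q ((i : Int), c) = p i := by simpa using h 0 (by simp)
    have ihv := ih (i + 1) p q (fun k hk => by
      have hx := h (k + 1) (by simpa using Nat.succ_lt_succ hk)
      rw [show i + (k + 1) = i + 1 + k from by omega] at hx
      simpa using hx)
    push_cast at ihv
    rw [PySem.List.enumerate_cons, List.countP_cons]
    push_cast
    rw [ihv]
    simp only [List.length_cons, pvCnt, h0]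
    cases hp : p i
    · simp [hp]
    · simp [hp]; ring

-- the pointwise bridge for B's parts predicate
lemma pv_start_bridge (cs : List Char) (k : Nat) (hk : k < cs.length) :
    ((fun p : Int × Char => p.2 != '-' && (p.1 == 0 || PySem.List.pyGet? cs (p.1 - 1) == some '-'))
      (((0 + k : Nat) : Int), cs[k])) = pvStart cs (0 + k) := by
  simp only [Nat.zero_add]
  rcases Nat.eq_zero_or_pos k with rfl | hp
  · simp [pvStart, pvGapB, List.getD_eq_getElem?_getD, hk]
  · have hcast : ((k : Nat) : Int) - 1 = ((k - 1 : Nat) : Int) := by omega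
    have hk1 : k - 1 < cs.length := by omega
    have hg : PySem.List.pyGet? cs (((k : Nat) : Int) - 1) = some cs[k - 1] := by
      rw [hcast]; simp [hk1]
    have hkz : (((k : Nat) : Int) == 0) = false := by simp; omega
    have hkz' : (k == 0) = false := by simp; omega
    simp only [hg, hkz, hkz', pvStart, pvGapB, List.getD_eq_getElem?_getD]
    simp [hk, hk1]

-- the pointwise bridge for B's coincidences predicate
lemma pv_match_bridge (cs ls : List Char) (k : Nat) (hk : k < cs.length) :
    ((fun p : Int × Char => p.2 != '-' && (PySem.List.pyGet? ls p.1 == some p.2))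
      (((0 + k : Nat) : Int), cs[k])) = pvMatch cs ls (0 + k) := by
  simp only [Nat.zero_add, pvMatch, List.getD_eq_getElem?_getD]
  simp [hk]

-- ===== VERDICT (by name: the statement is the Claim_ definition above) =====
theorem interpret_alignment_py_spec : Claim_equal_interpret_alignment_py := by
  intro s l _ hpre
  obtain ⟨hne, H⟩ := hpre
  unfold Spec_interpret_alignment_py interpret_alignment_py interpret_alignment_py_alt
  set cs := s.toList with hcs
  set ls := l.toList with hls
  set n := cs.length with hn
  -- skip loop facts
  obtain ⟨hi1, hi2, hi3⟩ := pvASkip_spec cs 0 (Nat.zero_le _)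
  set i0 := pvASkip cs 0 with hi0
  have hg0 : pvGapB cs i0 = true := by
    rcases Nat.eq_zero_or_pos i0 with hz | hp
    · simp [pvGapB, hz]
    · simp only [pvGapB, hi3 (i0 - 1) (Nat.zero_le _) (by omega)]; simp
  -- loop result via the count lemma
  have hloop := pvALoop_eq cs ls H (n - i0) i0 (by omega) 1 0
  rw [hg0] at hloop
  -- counts from i0 equal counts from 0
  obtain ⟨hz1, hz2, hz3⟩ := pv_below_skip cs ls i0 (fun j hj => hi3 j (Nat.zero_le _) hj)
  have hsplit : ∀ p : Nat → Bool, (∀ j, j < i0 → p j = false) →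
      pvCnt p i0 (n - i0) = pvCnt p 0 n := by
    intro p hp
    have ha := pvCnt_add p 0 i0 (n - i0)
    rw [pvCnt_zero p 0 i0 (fun j _ hj => hp j (by omega))] at ha
    simp only [Nat.zero_add] at ha
    rw [show i0 + (n - i0) = n from by omega] at ha
    omega
  rw [hsplit _ hz1, hsplit _ hz3] at hloop
  -- B's two counts
  have hB1 := pv_countP_enum cs 0 (pvMatch cs ls)
    (fun p => p.2 != '-' && (PySem.List.pyGet? ls p.1 == some p.2)) (pv_match_bridge cs ls)
  have hB2 := pv_countP_enum cs 0 (pvStart cs)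
    (fun p => p.2 != '-' && (p.1 == 0 || PySem.List.pyGet? cs (p.1 - 1) == some '-'))
    (pv_start_bridge cs)
  simp only [Nat.cast_zero] at hB1 hB2
  -- last character
  have hpos : 0 < n := List.length_pos_iff.mpr hne
  have hlast : PySem.List.pyGet? cs (-1) = some (cs.getD (n - 1) ' ') := by
    rw [PySem.List.pyGet?_neg_one, List.getLast?_eq_getElem?, List.getD_eq_getElem?_getD, ← hn]
    rw [List.getElem?_eq_getElem (show n - 1 < n from by omega)]
    simp
  have hpc := pv_parts_count cs hne
  rw [← hn] at hpc hB1 hB2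
  simp only [List.getD_eq_getElem?_getD] at hpc hlast
  simp only [hlast]
  by_cases hgl : cs[n - 1]?.getD ' ' = '-'
  · rw [if_pos hgl, hloop]
    rw [if_pos hgl] at hpc
    simp only [Prod.ext_iff]
    constructor
    · omega
    · omega
  · rw [if_neg hgl, hloop]
    rw [if_neg hgl] at hpc
    simp only [Prod.ext_iff]
    constructor
    · omega
    · omega
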